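-- pv_equiv track=rewrite | github.com/manu2504/WANCom | Phase_2/path_classifier/datavis/graph.py | deasteriskify
-- ===== SOURCE A (Python) =====
-- def deasteriskify(hops):
--     ret = []
--     previous = None
--     power = 0
--     for h in hops:
--         if h == '*':
--             power += 1
--             previous = '*'
--         else:
--             if(previous):
--                 ret.append("{}*".format(power))
--                 power = 0
--                 previous = None
--             ret.append(h)
--     return ret
-- ===== SOURCE B (Python) =====
-- def _take_run(star, hops):
--     run = []
--     i = 0
--     while i < len(hops) and (hops[i] == '*') == star:
--         run.append(hops[i])
--         i += 1
--     return run, hops[i:]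
--
-- def _runs(hops):
--     if not hops:
--         return []
--     star = hops[0] == '*'
--     run, rest = _take_run(star, hops[1:])
--     return [(star, [hops[0]] + run)] + _runs(rest)
--
-- def _emit(groups):
--     if not groups:
--         return []
--     (star, members), rest = groups[0], groups[1:]
--     if star:
--         if not rest:
--             return []
--         return ["{}*".format(len(members))] + _emit(rest)
--     return members + _emit(rest)
--
-- def deasteriskify(hops):
--     return _emit(_runs(hops))
-- ===== Notes on version B (the rewrite author's own statement) =====
-- stated objective: alternative
-- what changed: B first splits the input into maximal runs of star/non-star elements (a recursive run-splitter) and then recursively emits the runs, replacing each star run by its count marker unless it is the final run, instead of A's single stateful loop carrying ret/previous/power.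
import Mathlib
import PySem

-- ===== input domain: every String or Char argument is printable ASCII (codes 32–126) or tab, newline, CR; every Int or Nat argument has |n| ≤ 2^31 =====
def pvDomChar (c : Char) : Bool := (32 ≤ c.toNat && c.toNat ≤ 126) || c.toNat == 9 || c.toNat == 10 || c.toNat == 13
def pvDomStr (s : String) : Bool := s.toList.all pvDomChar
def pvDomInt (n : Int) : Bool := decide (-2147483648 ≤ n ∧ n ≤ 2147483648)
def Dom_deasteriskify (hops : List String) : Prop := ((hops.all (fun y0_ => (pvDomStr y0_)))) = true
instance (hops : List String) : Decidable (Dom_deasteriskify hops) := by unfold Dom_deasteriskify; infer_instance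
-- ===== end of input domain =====

-- B restructures A's stateful loop as: split the input into maximal star/non-star runs, then
-- emit the runs (a star run becomes its count marker unless it is the last run); proven equal.

-- ===== PORT A =====
-- state = (ret, previous, power), exactly A's three loop variables
def deasteriskifyStep (st : List String × Option String × Int) (h : String) :
    List String × Option String × Int :=
  let (ret, previous, power) := st
  if h == "*" then
    (ret, some "*", power + 1)
  else
    let (ret, power, previous) :=
      if previous.isSome then (ret ++ [PySem.Int.toStr power ++ "*"], (0 : Int), (none : Option String))
      else (ret, power, previous)
    (ret ++ [h], previous, power)

def deasteriskify (hops : List String) : List String :=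
  (hops.foldl deasteriskifyStep ([], none, 0)).1

-- ===== PORT B =====
-- _take_run: longest prefix whose elements' star-ness equals `star`, plus the remainder
def takeRun (star : Bool) : List String → List String × List String
  | [] => ([], [])
  | h :: t =>
    if (h == "*") = star then
      let (run, rest) := takeRun star t
      (h :: run, rest)
    else
      ([], h :: t)

theorem takeRun_snd_length (star : Bool) : ∀ (l : List String), (takeRun star l).2.length ≤ l.length
  | [] => by simp [takeRun]
  | h :: t => by
    simp only [takeRun]
    split
    · exact Nat.le_succ_of_le (takeRun_snd_length star t)
    · simp

-- _runs
def runs : List String → List (Bool × List String)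
  | [] => []
  | h :: t =>
    let star := h == "*"
    let pr := takeRun star t
    (star, h :: pr.1) :: runs pr.2
termination_by l => l.length
decreasing_by
  exact Nat.lt_succ_of_le (takeRun_snd_length _ t)

-- _emit
def emitRuns : List (Bool × List String) → List String
  | [] => []
  | (star, members) :: rest =>
    if star then
      match rest with
      | [] => []
      | _ :: _ => (PySem.Int.toStr (members.length : Int) ++ "*") :: emitRuns rest
    else
      members ++ emitRuns rest

def deasteriskify_alt (hops : List String) : List String :=
  emitRuns (runs hops)

-- ===== PRECONDITION & SPEC =====
def Spec_deasteriskify (hops : List String) (out : List String) : Prop := out = deasteriskify_alt hops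
instance (hops : List String) (out : List String) : Decidable (Spec_deasteriskify hops out) := by unfold Spec_deasteriskify; infer_instance

-- ===== CLAIM (what is proved, stated in full; the proofs are below) =====
def Claim_equal_deasteriskify : Prop := ∀ (hops : List String), Dom_deasteriskify hops → Spec_deasteriskify hops (deasteriskify hops)

-- ===== LEMMAS AND PROOFS =====

theorem step_star (r : List String) (prev : Option String) (p : Int) (h : String)
    (hs : (h == "*") = true) :
    deasteriskifyStep (r, prev, p) h = (r, some "*", p + 1) := by
  simp [deasteriskifyStep, hs]

theorem step_nonstar_none (r : List String) (p : Int) (h : String)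
    (hs : (h == "*") = false) :
    deasteriskifyStep (r, none, p) h = (r ++ [h], none, p) := by
  simp [deasteriskifyStep, hs]

theorem step_nonstar_some (r : List String) (s : String) (p : Int) (h : String)
    (hs : (h == "*") = false) :
    deasteriskifyStep (r, some s, p) h = (r ++ [PySem.Int.toStr p ++ "*"] ++ [h], none, 0) := by
  simp [deasteriskifyStep, hs]

-- ret only accumulates: the loop from (r, prev, p) is r ++ the loop from ([], prev, p)
theorem foldl_ret_append : ∀ (l : List String) (r : List String) (prev : Option String) (p : Int),
    l.foldl deasteriskifyStep (r, prev, p)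
      = (r ++ (l.foldl deasteriskifyStep ([], prev, p)).1,
         (l.foldl deasteriskifyStep ([], prev, p)).2.1,
         (l.foldl deasteriskifyStep ([], prev, p)).2.2) := by
  intro l
  induction l with
  | nil => intro r prev p; simp
  | cons h t ih =>
    intro r prev p
    simp only [List.foldl_cons]
    by_cases hs : (h == "*") = true
    · rw [step_star r prev p h hs, step_star [] prev p h hs, ih r, ih []]
      try simp
    · have hs' : (h == "*") = false := by simpa using hs
      cases prev with
      | none =>
        rw [step_nonstar_none r p h hs', step_nonstar_none [] p h hs',
          ih (r ++ [h]), ih ([] ++ [h])]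
        try simp
      | some s =>
        rw [step_nonstar_some r s p h hs', step_nonstar_some [] s p h hs',
          ih (r ++ [PySem.Int.toStr p ++ "*"] ++ [h]), ih ([] ++ [PySem.Int.toStr p ++ "*"] ++ [h])]
        try simp

-- a run of stars just bumps power
theorem foldl_star_run : ∀ (run : List String), (∀ x ∈ run, (x == "*") = true) →
    ∀ (r : List String) (p : Int),
    run.foldl deasteriskifyStep (r, some "*", p) = (r, some "*", p + run.length) := by
  intro run
  induction run with
  | nil => intro _ r p; simp
  | cons h t ih =>
    intro hall r p
    have hh : (h == "*") = true := hall h (by simp)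
    rw [List.foldl_cons, step_star r (some "*") p h hh,
      ih (fun x hx => hall x (by simp [hx])) r (p + 1)]
    simp
    ring

-- a run of non-stars from a clean state just appends the elements
theorem foldl_nonstar_run : ∀ (run : List String), (∀ x ∈ run, (x == "*") = false) →
    ∀ (r : List String) (rest : List String),
    (run ++ rest).foldl deasteriskifyStep (r, none, 0) = rest.foldl deasteriskifyStep (r ++ run, none, 0) := by
  intro run
  induction run with
  | nil => intro _ r rest; simp
  | cons h t ih =>
    intro hall r rest
    have hh : (h == "*") = false := hall h (by simp)
    rw [List.cons_append, List.foldl_cons, step_nonstar_none r 0 h hh,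
      ih (fun x hx => hall x (by simp [hx])) (r ++ [h]) rest]
    simp

-- the pending star run is flushed on the first non-star element
theorem foldl_flush (x : String) (hx : (x == "*") = false) (l r : List String) (p : Int) :
    (x :: l).foldl deasteriskifyStep (r, some "*", p)
      = (x :: l).foldl deasteriskifyStep (r ++ [PySem.Int.toStr p ++ "*"], none, 0) := by
  rw [List.foldl_cons, List.foldl_cons, step_nonstar_some r "*" p x hx,
    step_nonstar_none (r ++ [PySem.Int.toStr p ++ "*"]) 0 x hx]

theorem takeRun_split (star : Bool) : ∀ (l : List String),
    l = (takeRun star l).1 ++ (takeRun star l).2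
  | [] => by simp [takeRun]
  | h :: t => by
    simp only [takeRun]
    split
    · have := takeRun_split star t
      simpa using this
    · simp

theorem takeRun_mem (star : Bool) : ∀ (l : List String), ∀ x ∈ (takeRun star l).1, (x == "*") = star
  | [] => by simp [takeRun]
  | h :: t => by
    simp only [takeRun]
    split
    · rename_i heq
      intro x hx
      simp only [List.mem_cons] at hx
      rcases hx with rfl | hx
      · exact heq
      · exact takeRun_mem star t x hx
    · simp

theorem takeRun_rest_head (star : Bool) : ∀ (l : List String) (h : String) (t : List String),
    (takeRun star l).2 = h :: t → (h == "*") ≠ star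
  | [] => by simp [takeRun]
  | a :: l => by
    intro h t
    simp only [takeRun]
    split
    · exact takeRun_rest_head star l h t
    · rename_i hne
      intro he
      cases he
      exact hne

theorem runs_cons (h : String) (t : List String) :
    runs (h :: t) = ((h == "*"), h :: (takeRun (h == "*") t).1) :: runs ((takeRun (h == "*") t).2) := by
  rw [runs]

theorem emitRuns_true_cons (g : List (String)) (G : List (Bool × List String)) (hG : G ≠ []) :
    emitRuns ((true, g) :: G) = (PySem.Int.toStr (g.length : Int) ++ "*") :: emitRuns G := by
  cases G with
  | nil => exact absurd rfl hG
  | cons a l => simp [emitRuns]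

theorem main_eq : ∀ (n : Nat) (hops : List String), hops.length ≤ n →
    (hops.foldl deasteriskifyStep ([], none, 0)).1 = emitRuns (runs hops) := by
  intro n
  induction n with
  | zero =>
    intro hops hlen
    have : hops = [] := List.eq_nil_of_length_eq_zero (Nat.le_zero.mp hlen)
    subst this
    simp [runs, emitRuns]
  | succ n ih =>
    intro hops hlen
    cases hops with
    | nil => simp [runs, emitRuns]
    | cons h t =>
      have htlen : t.length ≤ n := by simpa using Nat.le_of_succ_le_succ (by simpa using hlen)
      by_cases hs : (h == "*") = true
      · -- star head
        obtain ⟨run, rest, hres⟩ : ∃ a b, takeRun true t = (a, b) := ⟨_, _, rfl⟩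
        have hsplit : t = run ++ rest := by
          have := takeRun_split true t
          rw [hres] at this
          simpa using this
        have hrestlen : rest.length ≤ n := by
          have := congrArg List.length hsplit
          simp at this
          omega
        have hmem : ∀ x ∈ run, (x == "*") = true := fun x hx =>
          takeRun_mem true t x (by rw [hres]; exact hx)
        have hrun : runs (h :: t) = (true, h :: run) :: runs rest := by
          rw [runs_cons, hs, hres]
        rw [hrun,
          show ((h :: t).foldl deasteriskifyStep (([] : List String), (none : Option String), (0 : Int)))
              = t.foldl deasteriskifyStep ([], some "*", 1) by
            rw [List.foldl_cons, step_star [] none 0 h hs]; norm_num,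
          hsplit, List.foldl_append, foldl_star_run run hmem [] 1]
        cases rest with
        | nil => simp [emitRuns, runs]
        | cons x l =>
          have hx : (x == "*") = false := by
            simpa using takeRun_rest_head true t x l (by rw [hres])
          rw [foldl_flush x hx l [] (1 + run.length), foldl_ret_append,
            emitRuns_true_cons (h :: run) (runs (x :: l)) (by rw [runs_cons]; simp),
            ← ih (x :: l) hrestlen]
          simp
          congr 1
          ring
      · -- non-star head
        have hs' : (h == "*") = false := by simpa using hs
        obtain ⟨run, rest, hres⟩ : ∃ a b, takeRun false t = (a, b) := ⟨_, _, rfl⟩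
        have hsplit : t = run ++ rest := by
          have := takeRun_split false t
          rw [hres] at this
          simpa using this
        have hrestlen : rest.length ≤ n := by
          have := congrArg List.length hsplit
          simp at this
          omega
        have hmem : ∀ x ∈ run, (x == "*") = false := fun x hx =>
          takeRun_mem false t x (by rw [hres]; exact hx)
        have hrun : runs (h :: t) = (false, h :: run) :: runs rest := by
          rw [runs_cons, hs', hres]
        rw [hrun,
          show ((h :: t).foldl deasteriskifyStep (([] : List String), (none : Option String), (0 : Int)))
              = t.foldl deasteriskifyStep ([h], none, 0) by
            rw [List.foldl_cons, step_nonstar_none [] 0 h hs']; simp,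
          hsplit, foldl_nonstar_run run hmem [h] rest, foldl_ret_append,
          ih rest hrestlen]
        simp [emitRuns]

-- ===== VERDICT (by name: the statement is the Claim_ definition above) =====
theorem deasteriskify_spec : Claim_equal_deasteriskify := by
  intro hops _
  unfold Spec_deasteriskify deasteriskify deasteriskify_alt
  exact main_eq hops.length hops (Nat.le_refl _)
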